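-- pv_equiv track=rewrite | github.com/superzhangmch/hexagon_magic_square_calc | code2.py | find
-- ===== SOURCE A (Python) =====
-- def find(arr, last_i, arr_len, total):
--     # Find all the subarrays with a length equal to arr_len and a sum equal to total
--     if arr_len <= 0:
--         return None
--     total_arr = []
--     for i in range(len(arr)):
--         a = arr[i]
--         #print (a, arr_len, total)
--         if a <= last_i: continue
--
--         if a == total and arr_len == 1:
--             total_arr.append([a])
--         else:
--             out = find(arr, a, arr_len-1, total-a)
--             if out:
--                 for o in out:
--                     total_arr.append([a] + o)
--                     #print (out, arr_len, 'v', total_arr)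
--     if not total_arr:
--         return None
--     return total_arr
-- ===== SOURCE B (Python) =====
-- def find(arr, last_i, arr_len, total):
--     # Same enumeration, but memoized on (last, length, total): overlapping
--     # subproblems are computed once instead of exponentially many times.
--     cache = {}
--
--     def go(last, k, t):
--         if k <= 0:
--             return None
--         key = (last, k, t)
--         if key in cache:
--             return cache[key]
--         res = []
--         for a in arr:
--             if a <= last:
--                 continue
--             if a == t and k == 1:
--                 res.append([a])
--             else:
--                 out = go(a, k - 1, t - a)
--                 if out:
--                     for o in out:
--                         res.append([a] + o)
--         res = res if res else None
--         cache[key] = res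
--         return res
--
--     return go(last_i, arr_len, total)
-- ===== Notes on version B (the rewrite author's own statement) =====
-- stated objective: faster
-- what changed: B memoizes the recursion on the key (last, arr_len, total) in a dict, so each overlapping subproblem is solved once and its result list is reused, instead of A's plain recursion that recomputes identical subtrees exponentially often.
import Mathlib
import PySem

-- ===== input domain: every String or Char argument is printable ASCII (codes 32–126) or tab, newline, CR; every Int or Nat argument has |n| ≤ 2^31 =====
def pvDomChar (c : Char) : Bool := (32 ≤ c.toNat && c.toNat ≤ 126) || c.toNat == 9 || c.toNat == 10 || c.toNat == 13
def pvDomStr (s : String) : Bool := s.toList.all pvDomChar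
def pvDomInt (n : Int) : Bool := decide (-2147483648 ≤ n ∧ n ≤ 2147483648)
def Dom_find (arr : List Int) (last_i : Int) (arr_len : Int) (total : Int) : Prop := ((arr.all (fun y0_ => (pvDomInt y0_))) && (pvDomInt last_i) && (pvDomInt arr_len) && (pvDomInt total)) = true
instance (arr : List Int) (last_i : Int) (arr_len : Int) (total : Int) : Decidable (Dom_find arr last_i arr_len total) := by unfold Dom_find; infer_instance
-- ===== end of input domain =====

-- B memoizes the recursion on (last, length, total) so overlapping subproblems are
-- computed once; A recomputes them. Return values are identical everywhere.

-- ===== PORT A =====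
-- literal port of A: plain recursion over arr_len, accumulating total_arr in a fold over arr
def find (arr : List Int) (last_i : Int) (arr_len : Int) (total : Int) :
    Option (List (List Int)) :=
  if arr_len ≤ 0 then none
  else
    let total_arr := arr.foldl (fun acc a =>
      if a ≤ last_i then acc
      else if a = total ∧ arr_len = 1 then acc ++ [[a]]
      else
        match find arr a (arr_len - 1) (total - a) with
        | none => acc
        | some out => if out = [] then acc else acc ++ out.map (fun o => a :: o)) []
    if total_arr = [] then none else some total_arr
termination_by arr_len.toNat
decreasing_by omega

-- ===== PORT B =====
-- port of Source B's inner `go`: same traversal, but a memo dict threaded through as state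
def find_go (arr : List Int) (last : Int) (k : Int) (t : Int)
    (cache : PySem.Dict (Int × Int × Int) (Option (List (List Int)))) :
    Option (List (List Int)) × PySem.Dict (Int × Int × Int) (Option (List (List Int))) :=
  if k ≤ 0 then (none, cache)
  else
    match cache.get? (last, k, t) with
    | some v => (v, cache)
    | none =>
      let p := arr.foldl (fun st a =>
        if a ≤ last then st
        else if a = t ∧ k = 1 then (st.1 ++ [[a]], st.2)
        else
          let q := find_go arr a (k - 1) (t - a) st.2
          match q.1 with
          | none => (st.1, q.2)
          | some out =>
            if out = [] then (st.1, q.2)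
            else (st.1 ++ out.map (fun o => a :: o), q.2)) ([], cache)
      let r : Option (List (List Int)) := if p.1 = [] then none else some p.1
      (r, p.2.insert (last, k, t) r)
termination_by k.toNat
decreasing_by omega

def find_alt (arr : List Int) (last_i : Int) (arr_len : Int) (total : Int) :
    Option (List (List Int)) :=
  (find_go arr last_i arr_len total PySem.Dict.empty).1

-- ===== PRECONDITION & SPEC =====
def Spec_find (arr : List Int) (last_i : Int) (arr_len : Int) (total : Int) (out : Option (List (List Int))) : Prop := out = find_alt arr last_i arr_len total
instance (arr : List Int) (last_i : Int) (arr_len : Int) (total : Int) (out : Option (List (List Int))) : Decidable (Spec_find arr last_i arr_len total out) := by unfold Spec_find; infer_instance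

-- ===== CLAIM (what is proved, stated in full; the proofs are below) =====
def Claim_equal_find : Prop := ∀ (arr : List Int) (last_i : Int) (arr_len : Int) (total : Int), Dom_find arr last_i arr_len total → Spec_find arr last_i arr_len total (find arr last_i arr_len total)

-- ===== LEMMAS AND PROOFS =====

-- invariant: every memo entry stores exactly A's value for its key
def CacheOK (arr : List Int)
    (c : PySem.Dict (Int × Int × Int) (Option (List (List Int)))) : Prop :=
  ∀ l k t v, c.get? (l, k, t) = some v → v = find arr l k t

theorem find_go_spec (arr : List Int) :
    ∀ (n : Nat) (k : Int), k.toNat = n → ∀ (last t : Int) c, CacheOK arr c →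
      (find_go arr last k t c).1 = find arr last k t ∧
      CacheOK arr (find_go arr last k t c).2 := by
  intro n
  induction n with
  | zero =>
    intro k hk last t c hc
    have hk0 : k ≤ 0 := by omega
    rw [find_go, find]
    simp [hk0]
    exact hc
  | succ m ih =>
    intro k hk last t c hc
    have hkpos : ¬ k ≤ 0 := by omega
    rw [find_go]
    simp only [hkpos, if_false]
    cases hget : c.get? (last, k, t) with
    | some v =>
      simp only
      exact ⟨hc last k t v hget, hc⟩
    | none =>
      simp only
      -- the loop: show fst = A's foldl and the cache stays OK
      have hloop : ∀ (l : List Int) (acc : List (List Int)) c', CacheOK arr c' →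
          (l.foldl (fun st a =>
            if a ≤ last then st
            else if a = t ∧ k = 1 then (st.1 ++ [[a]], st.2)
            else
              let q := find_go arr a (k - 1) (t - a) st.2
              match q.1 with
              | none => (st.1, q.2)
              | some out =>
                if out = [] then (st.1, q.2)
                else (st.1 ++ out.map (fun o => a :: o), q.2)) (acc, c')).1
          = l.foldl (fun acc a =>
              if a ≤ last then acc
              else if a = t ∧ k = 1 then acc ++ [[a]]
              else
                match find arr a (k - 1) (t - a) with
                | none => acc
                | some out => if out = [] then acc else acc ++ out.map (fun o => a :: o)) acc ∧
          CacheOK arr (l.foldl (fun st a =>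
            if a ≤ last then st
            else if a = t ∧ k = 1 then (st.1 ++ [[a]], st.2)
            else
              let q := find_go arr a (k - 1) (t - a) st.2
              match q.1 with
              | none => (st.1, q.2)
              | some out =>
                if out = [] then (st.1, q.2)
                else (st.1 ++ out.map (fun o => a :: o), q.2)) (acc, c')).2 := by
        intro l
        induction l with
        | nil => intro acc c' hc'; exact ⟨rfl, hc'⟩
        | cons a rest ihl =>
          intro acc c' hc'
          simp only [List.foldl_cons]
          by_cases h1 : a ≤ last
          · simp only [h1, if_true]; exact ihl acc c' hc'
          · simp only [h1, if_false]
            by_cases h2 : a = t ∧ k = 1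
            · simp only [if_pos h2]; exact ihl (acc ++ [[a]]) c' hc'
            · simp only [if_neg h2]
              obtain ⟨hfst, hsnd⟩ := ih (k - 1) (by omega) a (t - a) c' hc'
              cases hout : (find_go arr a (k - 1) (t - a) c').1 with
              | none =>
                simp only
                have : find arr a (k - 1) (t - a) = none := by rw [← hfst, hout]
                rw [this]
                exact ihl acc _ hsnd
              | some out =>
                simp only
                have : find arr a (k - 1) (t - a) = some out := by rw [← hfst, hout]
                rw [this]
                by_cases h3 : out = []
                · simp only [h3, if_true]
                  exact ihl acc _ hsnd
                · simp only [h3, if_false]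
                  exact ihl (acc ++ out.map (fun o => a :: o)) _ hsnd
      obtain ⟨hfst, hsnd⟩ := hloop arr [] c hc
      constructor
      · rw [find]
        simp only [hkpos, if_false]
        rw [← hfst]
      · -- the inserted entry is A's value; older entries stay correct
        intro l' k' t' v hv
        rw [PySem.Dict.get?_insert] at hv
        by_cases heq : (l', k', t') = (last, k, t)
        · rw [if_pos heq] at hv
          rw [Prod.mk.injEq, Prod.mk.injEq] at heq
          obtain ⟨h1, h2, h3⟩ := heq
          subst h1; subst h2; subst h3
          injection hv with hv
          rw [find]
          simp only [hkpos, if_false]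
          rw [← hfst, ← hv]
        · rw [if_neg heq] at hv
          exact hsnd l' k' t' v hv

-- the empty memo is trivially OK
theorem cacheOK_empty (arr : List Int) : CacheOK arr PySem.Dict.empty := by
  intro l k t v hv
  simp [PySem.Dict.get?_empty] at hv

-- ===== VERDICT (by name: the statement is the Claim_ definition above) =====
theorem find_spec : Claim_equal_find := by
  intro arr last_i arr_len total _
  unfold Spec_find find_alt
  exact ((find_go_spec arr arr_len.toNat arr_len rfl last_i total PySem.Dict.empty
    (cacheOK_empty arr)).1).symm
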